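-- pv_equiv track=rewrite | github.com/mi21061/code_completion | examples/test.py | five_adic_codon_encoding
-- ===== SOURCE A (Python) =====
-- def five_adic_codon_encoding(rna_codon: str) -> int:
--     #encode RNA codon (triplet) as one number in 5-adic system
--     encoding = ''
--
--     for nucleotide in rna_codon:
--         if nucleotide == 'C':
--             encoding += '1'
--         elif nucleotide == 'A':
--             encoding += '2'
--         elif nucleotide == 'T':
--             encoding += '3'
--         else: # nucleotide == G
--             encoding += '4'
--
--     return int(encoding)
-- ===== SOURCE B (Python) =====
-- def five_adic_codon_encoding(rna_codon: str) -> int: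
--     # Horner-style arithmetic encoding: no intermediate string, no int() parse.
--     mapping = {'C': 1, 'A': 2, 'T': 3}
--     result = 0
--     for nucleotide in rna_codon:
--         result = result * 10 + mapping.get(nucleotide, 4)
--     return result
-- ===== Notes on version B (the rewrite author's own statement) =====
-- stated objective: alternative
-- what changed: Replaces the if/elif chain that concatenates digit characters into a string and then parses it with int() by a dict lookup plus integer Horner accumulation (result = result*10 + digit); no string is built or parsed.
-- outside the precondition, e.g. on five_adic_codon_encoding(''): A raises ValueError, B returns 0
import Mathlib
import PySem

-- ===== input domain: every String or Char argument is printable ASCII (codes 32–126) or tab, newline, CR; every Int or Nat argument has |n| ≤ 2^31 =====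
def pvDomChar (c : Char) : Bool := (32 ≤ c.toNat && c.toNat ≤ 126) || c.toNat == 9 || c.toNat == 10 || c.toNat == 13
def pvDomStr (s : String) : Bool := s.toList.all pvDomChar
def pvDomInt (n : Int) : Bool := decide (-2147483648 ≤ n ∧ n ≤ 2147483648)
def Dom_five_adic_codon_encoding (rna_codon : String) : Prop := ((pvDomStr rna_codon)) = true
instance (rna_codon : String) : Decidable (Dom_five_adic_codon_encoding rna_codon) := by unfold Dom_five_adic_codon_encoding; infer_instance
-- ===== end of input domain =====

-- B replaces A's digit-string building + int() parse by dict-lookup Horner arithmetic; proved equal on nonempty strings.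

-- ===== PORT A =====
-- strings handled as lists of code points; int(encoding) = PySem.Int.ofChars?, whose
-- none case (ValueError on the empty string) is excluded by Pre_ and read off with getD.
def five_adic_codon_encoding (rna_codon : String) : Int :=
  (PySem.Int.ofChars? (rna_codon.toList.foldl (fun encoding nucleotide =>
    if nucleotide = 'C' then encoding ++ ['1']
    else if nucleotide = 'A' then encoding ++ ['2']
    else if nucleotide = 'T' then encoding ++ ['3']
    else encoding ++ ['4']) [])).getD 0

-- ===== PORT B =====
def five_adic_codon_encoding_alt (rna_codon : String) : Int :=
  rna_codon.toList.foldl (fun result nucleotide =>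
    result * 10 + (PySem.Dict.ofList [('C', 1), ('A', 2), ('T', 3)]).getD nucleotide 4) 0

-- ===== PRECONDITION & SPEC =====
-- Pre_ excludes only the empty string, on which A raises ValueError via int('') (B would return 0 there).
def Pre_five_adic_codon_encoding (rna_codon : String) : Prop := rna_codon ≠ ""
instance (rna_codon : String) : Decidable (Pre_five_adic_codon_encoding rna_codon) := by unfold Pre_five_adic_codon_encoding; infer_instance
def pvWitness_five_adic_codon_encoding : String := "CAT"

def Spec_five_adic_codon_encoding (rna_codon : String) (out : Int) : Prop := out = five_adic_codon_encoding_alt rna_codon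
instance (rna_codon : String) (out : Int) : Decidable (Spec_five_adic_codon_encoding rna_codon out) := by unfold Spec_five_adic_codon_encoding; infer_instance

-- ===== CLAIM (what is proved, stated in full; the proofs are below) =====
def Claim_equal_five_adic_codon_encoding : Prop := ∀ (rna_codon : String), Dom_five_adic_codon_encoding rna_codon → Pre_five_adic_codon_encoding rna_codon → Spec_five_adic_codon_encoding rna_codon (five_adic_codon_encoding rna_codon)

-- ===== LEMMAS AND PROOFS =====

lemma dig_not_space (c : Char) (h : c.isDigit = true) : PySem.Int.isIntSpace c = false := by
  unfold PySem.Int.isIntSpace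
  simp only [Bool.or_eq_false_iff, decide_eq_false_iff_not]
  refine ⟨⟨⟨⟨⟨?_,?_⟩,?_⟩,?_⟩,?_⟩,?_⟩ <;> rintro rfl <;> simp [Char.isDigit] at h

lemma omap_bind_eq_some_iff (o : Option Nat) (v : Nat) :
    (Option.map (fun n : Int => n) (do let a ← o; pure ((a : Nat) : Int)) = some ((v : Nat) : Int)) ↔ o = some v := by
  cases o <;> simp

-- int() on a nonempty all-digit string: Python's parse equals the left fold over decimal digits
lemma ofChars_digits (ds : List Char) (hne : ds ≠ []) (hd : ∀ c ∈ ds, c.isDigit = true) :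
    PySem.Int.ofChars? ds =
      some ((ds.foldl (fun a c => a * 10 + (c.toNat - '0'.toNat)) 0 : Nat) : Int) := by
  have hds1 : List.dropWhile PySem.Int.isIntSpace ds = ds := by
    cases ds with
    | nil => rfl
    | cons c t => simp [dig_not_space c (hd c (by simp))]
  have hds2 : List.dropWhile PySem.Int.isIntSpace ds.reverse = ds.reverse := by
    cases hrev : ds.reverse with
    | nil => rfl
    | cons c t =>
      have hc : c ∈ ds := by
        have : c ∈ ds.reverse := by rw [hrev]; simp
        simpa using this
      simp [dig_not_space c (hd c hc)]
  simp only [PySem.Int.ofChars?, hds1, hds2, List.reverse_reverse]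
  obtain ⟨c, t, rfl⟩ : ∃ c t, ds = c :: t := by
    cases ds with
    | nil => exact absurd rfl hne
    | cons c t => exact ⟨c, t, rfl⟩
  have hc : c.isDigit = true := hd c (by simp)
  split
  next ds2 heq =>
    exfalso; cases heq; simp at hc
  next ds2 heq =>
    exfalso; cases heq; simp at hc
  next ds2 h1 h2 =>
    rw [omap_bind_eq_some_iff]
    simp only [List.foldl_cons]
    conv_lhs => whnf
    rw [hc]
    conv_lhs => whnf
    generalize (0 * 10 + (c.toNat - '0'.toNat) : Nat) = a
    have hdt : ∀ x ∈ t, x.isDigit = true := fun x hx => hd x (List.mem_cons_of_mem _ hx)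
    clear hc hds1 hds2 h1 h2 hne hd
    revert hdt
    induction t generalizing a with
    | nil => intro _; rfl
    | cons e t' IH =>
      intro hdt
      have he : e.isDigit = true := hdt e (by simp)
      simp only [List.foldl_cons]
      conv_lhs => whnf
      rw [he]
      conv_lhs => whnf
      exact IH _ (fun x hx => hdt x (List.mem_cons_of_mem _ hx))

-- A's per-character translation
def trChar (c : Char) : Char :=
  if c = 'C' then '1' else if c = 'A' then '2' else if c = 'T' then '3' else '4'

lemma trChar_digit (c : Char) : (trChar c).isDigit = true := by
  unfold trChar; split_ifs <;> decide

lemma encA_eq_map (cs : List Char) : ∀ enc0 : List Char,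
    cs.foldl (fun encoding nucleotide =>
      if nucleotide = 'C' then encoding ++ ['1']
      else if nucleotide = 'A' then encoding ++ ['2']
      else if nucleotide = 'T' then encoding ++ ['3']
      else encoding ++ ['4']) enc0 = enc0 ++ cs.map trChar := by
  induction cs with
  | nil => intro enc0; simp
  | cons c t IH =>
    intro enc0
    simp only [List.foldl_cons, List.map_cons]
    rw [IH]
    unfold trChar
    split_ifs <;> simp

lemma horner_fuse (cs : List Char) : ∀ a : Nat,
    (((cs.map trChar).foldl (fun a c => a * 10 + (c.toNat - '0'.toNat)) a : Nat) : Int) =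
      cs.foldl (fun result nucleotide =>
        result * 10 + (PySem.Dict.ofList [('C', (1:Int)), ('A', 2), ('T', 3)]).getD nucleotide 4) (a : Int) := by
  induction cs with
  | nil => intro a; simp
  | cons c t IH =>
    intro a
    simp only [List.map_cons, List.foldl_cons]
    rw [IH]
    congr 1
    by_cases h1 : c = 'C'
    · subst h1
      have hd : (PySem.Dict.ofList [('C',(1:Int)),('A',2),('T',3)]).getD 'C' 4 = 1 := by decide
      have ht : (trChar 'C').toNat - '0'.toNat = 1 := by decide
      rw [hd, ht]; push_cast; ring
    · by_cases h2 : c = 'A'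
      · subst h2
        have hd : (PySem.Dict.ofList [('C',(1:Int)),('A',2),('T',3)]).getD 'A' 4 = 2 := by decide
        have ht : (trChar 'A').toNat - '0'.toNat = 2 := by decide
        rw [hd, ht]; push_cast; ring
      · by_cases h3 : c = 'T'
        · subst h3
          have hd : (PySem.Dict.ofList [('C',(1:Int)),('A',2),('T',3)]).getD 'T' 4 = 3 := by decide
          have ht : (trChar 'T').toNat - '0'.toNat = 3 := by decide
          rw [hd, ht]; push_cast; ring
        · have hd : (PySem.Dict.ofList [('C',(1:Int)),('A',2),('T',3)]).getD c 4 = 4 := by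
            simp [PySem.Dict.ofList, PySem.Dict.update, PySem.Dict.getD_insert, h1, h2, h3]
          have ht : (trChar c).toNat - '0'.toNat = 4 := by
            unfold trChar; rw [if_neg h1, if_neg h2, if_neg h3]; decide
          rw [hd, ht]; push_cast; ring

-- ===== VERDICT (by name: the statement is the Claim_ definition above) =====
theorem five_adic_codon_encoding_spec : Claim_equal_five_adic_codon_encoding := by
  intro rna_codon _ hpre
  unfold Spec_five_adic_codon_encoding five_adic_codon_encoding five_adic_codon_encoding_alt
  have hne : rna_codon.toList ≠ [] := fun h => hpre (String.toList_eq_nil_iff.mp h)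
  rw [encA_eq_map, List.nil_append]
  rw [ofChars_digits]
  · rw [Option.getD_some, horner_fuse]
    norm_num
  · simp [hne]
  · intro c hc
    obtain ⟨x, _, rfl⟩ := List.mem_map.mp hc
    exact trChar_digit x
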